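-- pv_equiv track=rewrite | github.com/constantinoval/PythonLibs | ls_parsers.py | splitByNseq
-- ===== SOURCE A (Python) =====
-- def splitByNseq(s, n):
--     while sum(n)+n[-1]<=len(s):
--         n.append(n[-1])
--     pos=[sum(n[:i+1]) for i in range(len(n))]
--     pos.insert(0,0)
--     rez=[]
--     for i in range(len(pos)-1):
--         rez.append(s[pos[i]:pos[i+1]].strip())
--     return rez
-- ===== SOURCE B (Python) =====
-- def splitByNseq(s, n):
--     # Single linear pass with a running start offset; no prefix-sum table,
--     # no repeated sum() calls. Unlike A, does NOT mutate n in place.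
--     rez = []
--     start = 0
--     for w in n:
--         rez.append(s[start:start + w].strip())
--         start += w
--     if n:
--         w = n[-1]
--         while start + w <= len(s):
--             rez.append(s[start:start + w].strip())
--             start += w
--     return rez
-- ===== Notes on version B (the rewrite author's own statement) =====
-- stated objective: faster
-- what changed: B replaces A's self-extending width list, quadratic prefix-sum table (sum(n[:i+1]) per index, sum(n) per while-test) and second slicing loop by one linear pass that keeps a running start offset and slices as it goes, continuing with the last width while chunks fit; B does not mutate n (A appends to it in place); intended as faster — a timing run measured B 283x at n=16384 but recorded it unconfirmed.
import Mathlib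
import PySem

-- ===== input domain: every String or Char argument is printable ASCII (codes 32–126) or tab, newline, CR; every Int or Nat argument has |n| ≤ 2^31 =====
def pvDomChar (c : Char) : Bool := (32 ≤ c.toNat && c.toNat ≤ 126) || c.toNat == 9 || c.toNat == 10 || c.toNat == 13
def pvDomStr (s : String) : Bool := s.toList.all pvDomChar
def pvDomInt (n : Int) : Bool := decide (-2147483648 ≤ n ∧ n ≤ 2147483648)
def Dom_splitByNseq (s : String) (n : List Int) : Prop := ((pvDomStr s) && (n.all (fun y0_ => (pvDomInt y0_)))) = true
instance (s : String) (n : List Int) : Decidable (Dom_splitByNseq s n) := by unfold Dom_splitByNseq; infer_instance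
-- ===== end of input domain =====

-- B replaces A's self-extending list + quadratic prefix-sum table + second loop by one linear
-- pass with a running start offset; intended as faster (timing run measured B 283x at its
-- largest size, though one probe input diverged in both, so 'faster' stands unconfirmed).
-- A mutates n in place (appends widths to it), B does not — the equivalence proved here is
-- about the RETURN value only.


-- ===== PORT A =====
-- A's while-loop 'while sum(n)+n[-1]<=len(s): n.append(n[-1])', fuelled; inside Pre_ the fuel
-- (L - sum n).toNat + 1 is never exhausted (each appended copy of the positive last width
-- raises the sum by at least 1).
def pvExtendA (L : Int) : Nat → List Int → List Int
  | 0, m => m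
  | f+1, m => if m.sum + m.getLast! ≤ L then pvExtendA L f (m ++ [m.getLast!]) else m

def splitByNseq (s : String) (n : List Int) : List String :=
  let L : Int := PySem.Str.len s
  let m := pvExtendA L ((L - n.sum).toNat + 1) n
  let pos : List Int := 0 :: (List.range m.length).map (fun i => (m.take (i+1)).sum)
  (List.range (pos.length - 1)).map (fun i =>
    PySem.Str.strip (PySem.Str.slice s (some (pos.getD i 0)) (some (pos.getD (i+1) 0))))

-- ===== PORT B =====
def pvChunkB (s : String) (st w : Int) : String :=
  PySem.Str.strip (PySem.Str.slice s (some st) (some (st + w)))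

-- B's trailing 'while start + w <= len(s)' loop, fuelled exactly like A's extension loop.
def pvTailB (s : String) (L w : Int) : Nat → Int → List String → List String
  | 0, _, rez => rez
  | f+1, st, rez => if st + w ≤ L then pvTailB s L w f (st + w) (rez ++ [pvChunkB s st w]) else rez

def splitByNseq_alt (s : String) (n : List Int) : List String :=
  let L : Int := PySem.Str.len s
  let p := n.foldl (fun (acc : List String × Int) w => (acc.1 ++ [pvChunkB s acc.2 w], acc.2 + w)) ([], 0)
  match n.getLast? with
  | none => p.1
  | some w => pvTailB s L w ((L - p.2).toNat + 1) p.2 p.1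

-- ===== PRECONDITION & SPEC =====
-- Pre_ excludes exactly the inputs where Python A does not return: n = [] (n[-1] raises
-- IndexError) and a non-positive last width whose extension loop is entered (A diverges).
def Pre_splitByNseq (s : String) (n : List Int) : Prop :=
  n ≠ [] ∧ (0 < n.getLast! ∨ (s.toList.length : Int) < n.sum + n.getLast!)
instance (s : String) (n : List Int) : Decidable (Pre_splitByNseq s n) := by
  unfold Pre_splitByNseq; infer_instance

def pvWitness_splitByNseq : String × List Int := ("ab cd ef", [3])

def Spec_splitByNseq (s : String) (n : List Int) (out : List String) : Prop := out = splitByNseq_alt s n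
instance (s : String) (n : List Int) (out : List String) : Decidable (Spec_splitByNseq s n out) := by unfold Spec_splitByNseq; infer_instance

-- ===== CLAIM (what is proved, stated in full; the proofs are below) =====
def Claim_equal_splitByNseq : Prop := ∀ (s : String) (n : List Int), Dom_splitByNseq s n → Pre_splitByNseq s n → Spec_splitByNseq s n (splitByNseq s n)

-- ===== LEMMAS AND PROOFS =====

-- The list of stripped chunks of widths ws starting at offset st: the common shape both
-- ports are reduced to.
def pvChunks (s : String) : List Int → Int → List String
  | [], _ => []
  | w :: ws, st => pvChunkB s st w :: pvChunks s ws (st + w)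

theorem pvChunks_append (s : String) (a b : List Int) (st : Int) :
    pvChunks s (a ++ b) st = pvChunks s a st ++ pvChunks s b (st + a.sum) := by
  induction a generalizing st with
  | nil => simp [pvChunks]
  | cons w ws ih => simp [pvChunks, ih, add_assoc]

theorem pvMapRange_eq_chunks (s : String) (m : List Int) (base : Int) :
    (List.range m.length).map (fun i =>
        PySem.Str.strip (PySem.Str.slice s (some (base + (m.take i).sum))
          (some (base + (m.take (i+1)).sum)))) = pvChunks s m base := by
  induction m generalizing base with
  | nil => simp [pvChunks]
  | cons w ws ih =>
    rw [List.length_cons, List.range_succ_eq_map, List.map_cons, List.map_map]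
    simp only [pvChunks]
    refine List.cons_eq_cons.mpr ⟨by simp [pvChunkB], ?_⟩
    · rw [← ih (base + w)]
      apply List.map_congr_left
      intro i _
      simp only [Function.comp_apply, List.take_succ_cons, List.sum_cons, add_assoc]

theorem pvExtendA_chunks (s : String) (L w : Int) :
    ∀ (f : Nat) (m : List Int) (rez : List String), m ≠ [] → m.getLast! = w →
      rez ++ pvChunks s (pvExtendA L f m) 0 = pvTailB s L w f m.sum (rez ++ pvChunks s m 0) := by
  intro f
  induction f with
  | zero => intro m rez _ _; simp [pvExtendA, pvTailB]
  | succ f ih =>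
    intro m rez hm hlast
    by_cases hc : m.sum + m.getLast! ≤ L
    · rw [pvExtendA, if_pos hc, pvTailB, if_pos (by rw [← hlast]; exact hc)]
      have hne : m ++ [m.getLast!] ≠ [] := by simp
      have hl : (m ++ [m.getLast!]).getLast! = w := by
        have h2 : (m ++ [m.getLast!]).getLast? = some m.getLast! := by simp
        rw [List.getLast!_eq_getLast?_getD, h2, Option.getD_some, hlast]
      have := ih (m ++ [m.getLast!]) rez hne hl
      rw [this]
      have hsum : (m ++ [m.getLast!]).sum = m.sum + m.getLast! := by simp
      rw [hsum, hlast, pvChunks_append]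
      simp [pvChunks, pvChunkB]
    · rw [pvExtendA, if_neg hc, pvTailB, if_neg (by rw [← hlast]; exact hc)]

theorem pvFoldB_eq_chunks (s : String) (n : List Int) :
    ∀ (rez : List String) (st : Int),
      n.foldl (fun (acc : List String × Int) w => (acc.1 ++ [pvChunkB s acc.2 w], acc.2 + w)) (rez, st)
        = (rez ++ pvChunks s n st, st + n.sum) := by
  induction n with
  | nil => intro rez st; simp [pvChunks]
  | cons w ws ih =>
    intro rez st
    simp only [List.foldl_cons, ih, pvChunks, List.sum_cons, Prod.mk.injEq]
    exact ⟨by simp, by ring⟩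

-- pos.getD i 0 is the i-th prefix sum, for i ≤ m.length.
theorem pvPos_getD (m : List Int) (i : Nat) (hi : i ≤ m.length) :
    ((0 :: (List.range m.length).map (fun j => (m.take (j+1)).sum)) : List Int).getD i 0
      = (m.take i).sum := by
  cases i with
  | zero => simp
  | succ j =>
    have hj : j < m.length := by omega
    simp [List.getD, hj]

theorem pvA_shape (s : String) (m : List Int) :
    (List.range (((0 :: (List.range m.length).map (fun j => (m.take (j+1)).sum) : List Int)).length - 1)).map
      (fun i => PySem.Str.strip (PySem.Str.slice s
        (some (((0 :: (List.range m.length).map (fun j => (m.take (j+1)).sum)) : List Int).getD i 0))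
        (some (((0 :: (List.range m.length).map (fun j => (m.take (j+1)).sum)) : List Int).getD (i+1) 0))))
    = pvChunks s m 0 := by
  have hlen : (((0 :: (List.range m.length).map (fun j => (m.take (j+1)).sum) : List Int)).length - 1) = m.length := by
    simp
  rw [hlen, ← pvMapRange_eq_chunks s m 0]
  apply List.map_congr_left
  intro i hi
  rw [List.mem_range] at hi
  rw [pvPos_getD m i (by omega), pvPos_getD m (i+1) (by omega)]
  simp

theorem splitByNseq_eq_chunks (s : String) (n : List Int) :
    splitByNseq s n
      = pvChunks s (pvExtendA (PySem.Str.len s) ((PySem.Str.len s - n.sum).toNat + 1) n) 0 := by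
  simp only [splitByNseq]
  exact pvA_shape s (pvExtendA (PySem.Str.len s) ((PySem.Str.len s - n.sum).toNat + 1) n)

-- ===== VERDICT (by name: the statement is the Claim_ definition above) =====
theorem splitByNseq_spec : Claim_equal_splitByNseq := by
  intro s n _ hpre
  obtain ⟨hne, _⟩ := hpre
  unfold Spec_splitByNseq splitByNseq_alt
  rw [splitByNseq_eq_chunks]
  simp only [pvFoldB_eq_chunks s n [] 0, List.nil_append, zero_add]
  obtain ⟨w, hw⟩ : ∃ w, n.getLast? = some w := by
    cases h : n.getLast? with
    | none => exact absurd (List.getLast?_eq_none_iff.mp h) hne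
    | some w => exact ⟨w, rfl⟩
  rw [hw]
  have hlast : n.getLast! = w := by rw [List.getLast!_eq_getLast?_getD, hw]; rfl
  have := pvExtendA_chunks s (PySem.Str.len s) w ((PySem.Str.len s - n.sum).toNat + 1) n [] hne hlast
  simpa using this
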